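-- pv_equiv track=rewrite | github.com/jmontp/LocoHub | contributor_tools/quick_validation_check.py | _base_task_name
-- ===== SOURCE A (Python) =====
-- POPULATION_SUFFIXES = [
--     '_stroke', '_amputee', '_tfa', '_tta', '_pd', '_sci', '_cp',
--     '_ms', '_oa', '_cva', '_parkinsons'
-- ]
--
-- def _base_task_name(task: str) -> str:
--     """Remove population suffixes for registry comparisons."""
--
--     if not task:
--         return ''
--
--     task_lower = task.lower()
--     for suffix in POPULATION_SUFFIXES:
--         if task_lower.endswith(suffix):
--             return task_lower[:-len(suffix)]
--     return task_lower
-- ===== SOURCE B (Python) =====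
-- POPULATION_SUFFIXES = [
--     '_stroke', '_amputee', '_tfa', '_tta', '_pd', '_sci', '_cp',
--     '_ms', '_oa', '_cva', '_parkinsons'
-- ]
--
-- _POP_SET = frozenset(POPULATION_SUFFIXES)
--
--
-- def _base_task_name(task: str) -> str:
--     """Remove population suffixes for registry comparisons."""
--     t = task.lower()
--     head, sep, tail = t.rpartition('_')
--     if sep and '_' + tail in _POP_SET:
--         return head
--     return t
-- ===== Notes on version B (the rewrite author's own statement) =====
-- stated objective: idiomatic
-- what changed: Replaces the scan over the 11-element suffix list (one endswith per element) with a single rpartition at the last underscore and one frozenset membership test of the final underscore-delimited segment (with its leading underscore); the empty-string guard becomes unnecessary and is dropped.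
import Mathlib
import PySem

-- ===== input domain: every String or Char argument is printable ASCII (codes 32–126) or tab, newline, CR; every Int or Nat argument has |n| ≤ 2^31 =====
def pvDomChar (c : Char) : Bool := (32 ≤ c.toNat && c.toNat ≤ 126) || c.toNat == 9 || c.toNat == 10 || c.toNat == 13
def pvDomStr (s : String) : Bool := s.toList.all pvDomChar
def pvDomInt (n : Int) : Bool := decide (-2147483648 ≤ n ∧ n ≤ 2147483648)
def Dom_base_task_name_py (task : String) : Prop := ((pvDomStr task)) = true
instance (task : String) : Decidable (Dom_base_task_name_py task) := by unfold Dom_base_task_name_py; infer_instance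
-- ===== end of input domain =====

-- B replaces A's scan over the suffix list with one rpartition at the last underscore and a
-- single set-membership test of the final underscore-delimited segment (idiomatic; same return value everywhere).

-- ===== PORT A =====
def pvSuffixes : List (List Char) :=
  ["_stroke".toList, "_amputee".toList, "_tfa".toList, "_tta".toList, "_pd".toList,
   "_sci".toList, "_cp".toList, "_ms".toList, "_oa".toList, "_cva".toList,
   "_parkinsons".toList]

-- the for-loop over POPULATION_SUFFIXES: first endswith match returns task_lower[:-len(suffix)]
def pvLoopA (t : List Char) : List (List Char) → List Char
  | [] => t
  | suf :: rest =>
      if PySem.Chars.endswith t suf then PySem.Chars.slice t none (some (-(suf.length : Int)))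
      else pvLoopA t rest

def base_task_name_py (task : String) : String :=
  if task = "" then ""
  else String.ofList (pvLoopA (PySem.Chars.lower task.toList) pvSuffixes)

-- ===== PORT B =====
def pvPopSet : PySem.Set (List Char) := PySem.Set.ofList pvSuffixes

-- hand port of t.rpartition('_') reduced to the index of the LAST '_' (none if absent); exact
def pvLastUnd : List Char → Option Nat
  | [] => none
  | c :: cs =>
      match pvLastUnd cs with
      | some j => some (j + 1)
      | none => if c = '_' then some 0 else none

def base_task_name_py_alt (task : String) : String :=
  let t := PySem.Chars.lower task.toList
  match pvLastUnd t with
  | none => String.ofList t                 -- sep = '': no underscore, return t unchanged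
  | some i =>
      if t.drop i ∈ pvPopSet then String.ofList (t.take i)   -- '_' + tail = t[i:], head = t[:i]
      else String.ofList t

-- ===== PRECONDITION & SPEC =====
def Spec_base_task_name_py (task : String) (out : String) : Prop := out = base_task_name_py_alt task
instance (task : String) (out : String) : Decidable (Spec_base_task_name_py task out) := by unfold Spec_base_task_name_py; infer_instance

-- ===== CLAIM (what is proved, stated in full; the proofs are below) =====
def Claim_equal_base_task_name_py : Prop := ∀ (task : String), Dom_base_task_name_py task → Spec_base_task_name_py task (base_task_name_py task)

-- ===== LEMMAS AND PROOFS =====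

lemma lastUnd_eq_none_iff (t : List Char) : pvLastUnd t = none ↔ '_' ∉ t := by
  induction t with
  | nil => simp [pvLastUnd]
  | cons c cs ih =>
      simp only [pvLastUnd]
      cases h : pvLastUnd cs with
      | some j =>
          have hm : '_' ∈ cs := by
            by_contra hm
            rw [ih.mpr hm] at h
            simp at h
          simp [hm]
      | none =>
          by_cases hc : c = '_'
          · simp [hc]
          · simp [hc, ih.mp h, Ne.symm hc]

lemma lastUnd_append (p w : List Char) (hw : '_' ∉ w) :
    pvLastUnd (p ++ '_' :: w) = some p.length := by
  induction p with
  | nil => simp [pvLastUnd, (lastUnd_eq_none_iff w).mpr hw]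
  | cons c cs ih => simp [pvLastUnd, ih]

lemma lastUnd_spec (t : List Char) (i : Nat) (h : pvLastUnd t = some i) :
    ∃ p w, t = p ++ '_' :: w ∧ p.length = i ∧ '_' ∉ w := by
  induction t generalizing i with
  | nil => simp [pvLastUnd] at h
  | cons c cs ih =>
      simp only [pvLastUnd] at h
      cases hcs : pvLastUnd cs with
      | some j =>
          rw [hcs] at h
          obtain ⟨p, w, rfl, rfl, hw⟩ := ih j hcs
          exact ⟨c :: p, w, by simp, by simpa using Option.some.inj h, hw⟩
      | none =>
          rw [hcs] at h
          by_cases hc : c = '_'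
          · subst hc; simp at h
            exact ⟨[], cs, by simp, by simp [← h], (lastUnd_eq_none_iff cs).mp hcs⟩
          · simp [hc] at h

lemma loopA_no_match (t : List Char) (L : List (List Char))
    (h : ∀ s ∈ L, PySem.Chars.endswith t s = false) : pvLoopA t L = t := by
  induction L with
  | nil => rfl
  | cons s rest ih =>
      simp only [pvLoopA, h s (by simp)]
      exact ih fun x hx => h x (by simp [hx])

lemma loopA_unique_match (t : List Char) (suf : List Char) (L : List (List Char))
    (hmem : suf ∈ L) (hend : PySem.Chars.endswith t suf = true)
    (huniq : ∀ s ∈ L, PySem.Chars.endswith t s = true → s = suf) :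
    pvLoopA t L = PySem.Chars.slice t none (some (-(suf.length : Int))) := by
  induction L with
  | nil => simp at hmem
  | cons s rest ih =>
      by_cases hs : PySem.Chars.endswith t s = true
      · have : s = suf := huniq s (by simp) hs
        subst this
        simp [pvLoopA, hs]
      · have hsuf : suf ∈ rest := by
          rcases List.mem_cons.mp hmem with h | h
          · exact absurd (h ▸ hend) hs
          · exact h
        simp only [pvLoopA]
        rw [if_neg hs]
        exact ih hsuf fun x hx => huniq x (by simp [hx])

-- concrete facts about the suffix constant
lemma suffixes_head : ∀ s ∈ pvSuffixes, s.head? = some '_' ∧ '_' ∉ s.tail := by decide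

lemma suffixes_shape : ∀ s ∈ pvSuffixes, ∃ w, s = '_' :: w ∧ '_' ∉ w := by
  intro s hs
  obtain ⟨h1, h2⟩ := suffixes_head s hs
  cases s with
  | nil => exact absurd h1 (by simp)
  | cons a w =>
      simp only [List.head?] at h1
      exact ⟨w, by simp [Option.some.inj h1], by simpa using h2⟩

lemma core_eq (t : List Char) :
    String.ofList (pvLoopA t pvSuffixes) =
      (match pvLastUnd t with
       | none => String.ofList t
       | some i => if t.drop i ∈ pvPopSet then String.ofList (t.take i) else String.ofList t) := by
  cases h : pvLastUnd t with
  | none =>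
      have hno : '_' ∉ t := (lastUnd_eq_none_iff t).mp h
      rw [loopA_no_match]
      intro s hs
      obtain ⟨w, rfl, -⟩ := suffixes_shape s hs
      rw [← Bool.not_eq_true, PySem.Chars.endswith_iff]
      intro hsfx
      exact hno (hsfx.subset (by simp))
  | some i =>
      obtain ⟨p, w, rfl, rfl, hw⟩ := lastUnd_spec t i h
      have hdrop : (p ++ '_' :: w).drop p.length = '_' :: w := by
        simp
      have htake : (p ++ '_' :: w).take p.length = p := by
        simp
      by_cases hmem : ('_' :: w) ∈ pvSuffixes
      · -- the final segment names a suffix: A's loop hits exactly this one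
        have hend : PySem.Chars.endswith (p ++ '_' :: w) ('_' :: w) = true := by
          rw [PySem.Chars.endswith_iff]; exact ⟨p, rfl⟩
        have huniq : ∀ s ∈ pvSuffixes,
            PySem.Chars.endswith (p ++ '_' :: w) s = true → s = '_' :: w := by
          intro s hs hends
          obtain ⟨v, rfl, hv⟩ := suffixes_shape s hs
          have hsfx : ('_' :: v) <:+ (p ++ '_' :: w) :=
            (PySem.Chars.endswith_iff _ _).mp hends
          obtain ⟨q, hq⟩ := hsfx
          have hl := lastUnd_append q v hv
          rw [hq, lastUnd_append p w hw] at hl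
          have hql : q.length = p.length := (Option.some.inj hl).symm
          have := List.append_inj hq hql
          simpa using this.2
        rw [loopA_unique_match _ _ _ hmem hend huniq]
        have hlt : 0 < ('_' :: w).length := by simp
        rw [PySem.Chars.slice]
        rw [PySem.List.slice_to_neg_natCast _ _ hlt]
        simp [hdrop, hmem, htake, PySem.Set.mem_ofList, pvPopSet]
      · -- the final segment is not a known suffix: no endswith can fire
        have hno : ∀ s ∈ pvSuffixes, PySem.Chars.endswith (p ++ '_' :: w) s = false := by
          intro s hs
          obtain ⟨v, rfl, hv⟩ := suffixes_shape s hs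
          rw [← Bool.not_eq_true, PySem.Chars.endswith_iff]
          intro hsfx
          obtain ⟨q, hq⟩ := hsfx
          have hl := lastUnd_append q v hv
          rw [hq, lastUnd_append p w hw] at hl
          have hql : q.length = p.length := (Option.some.inj hl).symm
          have := List.append_inj hq hql
          exact hmem (by rw [← this.2]; exact hs)
        rw [loopA_no_match _ _ hno]
        simp [hdrop, pvPopSet, PySem.Set.mem_ofList, hmem]

-- ===== VERDICT (by name: the statement is the Claim_ definition above) =====
theorem base_task_name_py_spec : Claim_equal_base_task_name_py := by
  intro task _
  unfold Spec_base_task_name_py base_task_name_py base_task_name_py_alt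
  by_cases h : task = ""
  · subst h
    simp [pvLastUnd, PySem.Chars.lower]
  · rw [if_neg h]
    exact core_eq _
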